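-- pv_equiv track=rewrite | github.com/MaximGorobec/EssencePath | fun/render_fun.py | is_connected_subgraph
-- ===== SOURCE A (Python) =====
-- from collections import deque
--
-- def is_connected_subgraph(graph, target_nodes):
--     if len(target_nodes) <= 1:
--         return True
--
--     start = target_nodes[0]
--     visited = set()
--     queue = deque([start])
--
--     while queue:
--         node = queue.popleft()
--         if node in visited:
--             continue
--         visited.add(node)
--         for neighbor in graph.get(node, []):
--             if neighbor not in visited:
--                 queue.append(neighbor)
--
--     return all(node in visited for node in target_nodes)
-- ===== SOURCE B (Python) =====
-- def is_connected_subgraph(graph, target_nodes):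
--     if len(target_nodes) <= 1:
--         return True
--
--     visited = {target_nodes[0]}
--     changed = True
--     while changed:
--         changed = False
--         for node, neighbors in graph.items():
--             if node in visited:
--                 for neighbor in neighbors:
--                     if neighbor not in visited:
--                         visited.add(neighbor)
--                         changed = True
--
--     return all(node in visited for node in target_nodes)
-- ===== Notes on version B (the rewrite author's own statement) =====
-- stated objective: alternative
-- what changed: Replaced the BFS worklist (deque + per-node visited check) by a round-based fixed-point saturation that rescans the adjacency lists until a full pass adds no node; Pre_ requires distinct keys in the association-list view of the graph, since a Python dict cannot contain duplicate keys.
import Mathlib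
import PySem

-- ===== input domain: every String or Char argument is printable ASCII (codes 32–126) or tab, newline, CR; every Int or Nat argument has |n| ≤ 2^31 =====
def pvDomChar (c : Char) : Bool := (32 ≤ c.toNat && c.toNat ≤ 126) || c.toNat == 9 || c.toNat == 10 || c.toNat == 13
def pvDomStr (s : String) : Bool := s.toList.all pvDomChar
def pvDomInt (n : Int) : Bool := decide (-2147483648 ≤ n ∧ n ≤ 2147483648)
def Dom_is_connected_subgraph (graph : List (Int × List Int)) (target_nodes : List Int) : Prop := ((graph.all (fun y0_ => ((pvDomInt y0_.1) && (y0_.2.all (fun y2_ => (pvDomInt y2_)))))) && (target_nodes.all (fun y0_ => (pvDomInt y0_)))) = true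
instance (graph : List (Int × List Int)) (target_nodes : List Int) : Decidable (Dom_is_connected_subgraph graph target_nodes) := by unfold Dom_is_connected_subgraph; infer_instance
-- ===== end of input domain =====

-- B replaces A's BFS worklist by a round-based fixed-point saturation over the adjacency
-- lists (rescan until a pass adds nothing): a different algorithm of similar size ('alternative').

-- shared helper: graph.get(node, []) — first-match lookup in the dict (assoc list)
def pvAdj (g : List (Int × List Int)) (v : Int) : List Int := (PySem.Dict.mk g).getD v []

-- all node values that can ever be enqueued / added besides the start node
def pvNbrs (g : List (Int × List Int)) : List Int := g.flatMap (fun p => p.2)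

lemma pvAdj_cons (k : Int) (vs : List Int) (rest : List (Int × List Int)) (x : Int) :
    pvAdj ((k, vs) :: rest) x = if k == x then vs else pvAdj rest x := by
  simp only [pvAdj, PySem.Dict.getD_eq_get?_getD, PySem.Dict.get?_mk_cons]
  split <;> rfl

lemma pvAdj_nil (x : Int) : pvAdj [] x = [] := rfl

lemma pvAdj_subset_nbrs (g : List (Int × List Int)) (v : Int) :
    ∀ x ∈ pvAdj g v, x ∈ pvNbrs g := by
  induction g with
  | nil => simp [pvAdj_nil]
  | cons p rest ih =>
    obtain ⟨k, vs⟩ := p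
    intro x hx
    rw [pvAdj_cons] at hx
    simp only [pvNbrs, List.flatMap_cons, List.mem_append]
    split at hx
    · exact Or.inl hx
    · exact Or.inr (ih x hx)

-- ===== PORT A =====  (BFS with a queue, exactly A's loop; the proof argument only
-- establishes termination — every queued node lies in pvUniv)

def pvUniv (g : List (Int × List Int)) (s : Int) : List Int := s :: pvNbrs g

def bfsAux (g : List (Int × List Int)) (s : Int) (visited : List Int) (queue : List Int)
    (hq : ∀ x ∈ queue, x ∈ pvUniv g s) : List Int :=
  match queue with
  | [] => visited
  | node :: rest =>
    if hmem : visited.contains node then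
      bfsAux g s visited rest (fun x hx => hq x (List.mem_cons_of_mem _ hx))
    else
      bfsAux g s (node :: visited)
        (rest ++ (pvAdj g node).filter (fun m => !(node :: visited).contains m))
        (by
          intro x hx
          rcases List.mem_append.mp hx with h | h
          · exact hq x (List.mem_cons_of_mem _ h)
          · exact List.mem_cons_of_mem _ (pvAdj_subset_nbrs g node x (List.mem_of_mem_filter h)))
termination_by (((pvUniv g s).toFinset \ visited.toFinset).card, queue.length)
decreasing_by
  · exact Prod.Lex.right _ (by simp)
  · apply Prod.Lex.left
    apply Finset.card_lt_card
    constructor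
    · apply Finset.sdiff_subset_sdiff (Finset.Subset.refl _)
      intro y hy
      simp only [List.toFinset_cons, Finset.mem_insert, List.mem_toFinset] at *
      exact Or.inr hy
    · intro hsub
      have hnode : node ∈ (pvUniv g s).toFinset \ visited.toFinset := by
        simp only [Finset.mem_sdiff, List.mem_toFinset]
        refine ⟨hq node (List.mem_cons_self), ?_⟩
        simpa using hmem
      have := hsub hnode
      simp at this

def is_connected_subgraph (graph : List (Int × List Int)) (target_nodes : List Int) : Bool :=
  if target_nodes.length ≤ 1 then true
  else
    let start := target_nodes.headI
    let visited := bfsAux graph start [] [start]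
      (by intro x hx; simp only [List.mem_singleton] at hx; subst hx; exact List.mem_cons_self)
    target_nodes.all (fun node => visited.contains node)

-- ===== PORT B =====  (round-based saturation: rescan graph.items() until no change)

-- inner loop: 'for neighbor in neighbors: if neighbor not in visited: visited.add(neighbor); changed = True'
def addAll (st : List Int × Bool) (L : List Int) : List Int × Bool :=
  L.foldl (fun st2 m => if st2.1.contains m then st2 else (m :: st2.1, true)) st

-- one pass: 'for node, neighbors in graph.items(): if node in visited: <inner loop>'
def passF (g : List (Int × List Int)) (st : List Int × Bool) : List Int × Bool :=
  g.foldl (fun st2 p => if st2.1.contains p.1 then addAll st2 p.2 else st2) st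

lemma addAll_spec (L : List Int) (st : List Int × Bool) :
    (∀ x ∈ st.1, x ∈ (addAll st L).1) ∧
    (∀ x ∈ (addAll st L).1, x ∈ st.1 ∨ x ∈ L) ∧
    ((addAll st L).2 = true → st.2 = true ∨ ∃ m, m ∈ (addAll st L).1 ∧ m ∉ st.1 ∧ m ∈ L) := by
  induction L generalizing st with
  | nil => exact ⟨fun x hx => hx, fun x hx => Or.inl hx, fun h => Or.inl h⟩
  | cons m rest ih =>
    simp only [addAll, List.foldl_cons] at *
    by_cases hm : st.1.contains m
    · simp only [hm, if_pos]
      obtain ⟨h1, h2, h3⟩ := ih st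
      exact ⟨h1, fun x hx => (h2 x hx).imp id (List.mem_cons_of_mem _),
        fun h => (h3 h).imp id (fun ⟨a, ha1, ha2, ha3⟩ => ⟨a, ha1, ha2, List.mem_cons_of_mem _ ha3⟩)⟩
    · simp only [hm, if_neg, Bool.false_eq_true, not_false_iff]
      obtain ⟨h1, h2, h3⟩ := ih (m :: st.1, true)
      refine ⟨fun x hx => h1 x (List.mem_cons_of_mem _ hx), ?_, ?_⟩
      · intro x hx
        rcases h2 x hx with h | h
        · rcases List.mem_cons.mp h with h | h
          · exact Or.inr (h ▸ List.mem_cons_self)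
          · exact Or.inl h
        · exact Or.inr (List.mem_cons_of_mem _ h)
      · intro _
        refine Or.inr ⟨m, h1 m List.mem_cons_self, ?_, List.mem_cons_self⟩
        simpa using hm
  
lemma passF_spec (g : List (Int × List Int)) (st : List Int × Bool) :
    (∀ x ∈ st.1, x ∈ (passF g st).1) ∧
    (∀ x ∈ (passF g st).1, x ∈ st.1 ∨ x ∈ pvNbrs g) ∧
    ((passF g st).2 = true → st.2 = true ∨ ∃ m, m ∈ (passF g st).1 ∧ m ∉ st.1 ∧ m ∈ pvNbrs g) := by
  induction g generalizing st with
  | nil => exact ⟨fun x hx => hx, fun x hx => Or.inl hx, fun h => Or.inl h⟩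
  | cons p rest ih =>
    simp only [passF, List.foldl_cons] at *
    by_cases hp : st.1.contains p.1
    · simp only [hp, if_pos]
      obtain ⟨h1, h2, h3⟩ := ih (addAll st p.2)
      obtain ⟨a1, a2, a3⟩ := addAll_spec p.2 st
      refine ⟨fun x hx => h1 x (a1 x hx), ?_, ?_⟩
      · intro x hx
        rcases h2 x hx with h | h
        · rcases a2 x h with h' | h'
          · exact Or.inl h'
          · exact Or.inr (by simp [pvNbrs, List.flatMap_cons]; exact Or.inl h')
        · exact Or.inr (by simp only [pvNbrs, List.flatMap_cons, List.mem_append]; exact Or.inr h)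
      · intro h
        rcases h3 h with h' | ⟨m, hm1, hm2, hm3⟩
        · rcases a3 h' with h'' | ⟨m, hm1, hm2, hm3⟩
          · exact Or.inl h''
          · exact Or.inr ⟨m, h1 m hm1, hm2, by simp only [pvNbrs, List.flatMap_cons, List.mem_append]; exact Or.inl hm3⟩
        · refine Or.inr ⟨m, hm1, fun hc => hm2 (a1 m hc), by simp only [pvNbrs, List.flatMap_cons, List.mem_append]; exact Or.inr hm3⟩
    · simp only [hp, if_neg, Bool.false_eq_true, not_false_iff]
      obtain ⟨h1, h2, h3⟩ := ih st
      exact ⟨h1, fun x hx => (h2 x hx).imp id (by simp only [pvNbrs, List.flatMap_cons, List.mem_append]; exact Or.inr),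
        fun h => (h3 h).imp id (fun ⟨m, hm1, hm2, hm3⟩ => ⟨m, hm1, hm2, by simp only [pvNbrs, List.flatMap_cons, List.mem_append]; exact Or.inr hm3⟩)⟩

-- 'while changed:' — each iteration with changed=True strictly grows visited inside pvNbrs
def satLoop (g : List (Int × List Int)) (visited : List Int) : List Int :=
  let st := passF g (visited, false)
  if h : st.2 then satLoop g st.1 else st.1
termination_by ((pvNbrs g).toFinset \ visited.toFinset).card
decreasing_by
  obtain ⟨h1, h2, h3⟩ := passF_spec g (visited, false)
  rcases h3 h with hfalse | ⟨m, hm1, hm2, hm3⟩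
  · exact absurd hfalse (by simp)
  · apply Finset.card_lt_card
    constructor
    · apply Finset.sdiff_subset_sdiff (Finset.Subset.refl _)
      intro y hy
      simp only [List.mem_toFinset] at *
      exact h1 y hy
    · intro hsub
      have hmmem : m ∈ (pvNbrs g).toFinset \ (passF g (visited, false)).1.toFinset → False := by
        simp only [Finset.mem_sdiff, List.mem_toFinset]
        exact fun ⟨_, hc⟩ => hc hm1
      exact hmmem (hsub (by simp only [Finset.mem_sdiff, List.mem_toFinset]; exact ⟨hm3, hm2⟩))

def is_connected_subgraph_alt (graph : List (Int × List Int)) (target_nodes : List Int) : Bool :=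
  if target_nodes.length ≤ 1 then true
  else
    let start := target_nodes.headI
    let visited := satLoop graph [start]
    target_nodes.all (fun node => visited.contains node)

-- ===== PRECONDITION & SPEC =====
-- Pre_ requires the dict's keys to be distinct: an association list with duplicate keys does
-- not represent any Python dict (A's argument is a dict, which cannot hold duplicate keys),
-- and on such lists A's first-match lookup and B's full scan of the items could disagree.
def Pre_is_connected_subgraph (graph : List (Int × List Int)) (target_nodes : List Int) : Prop :=
  (graph.map Prod.fst).Nodup
instance (graph : List (Int × List Int)) (target_nodes : List Int) : Decidable (Pre_is_connected_subgraph graph target_nodes) := by unfold Pre_is_connected_subgraph; infer_instance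

def pvWitness_is_connected_subgraph : (List (Int × List Int)) × List Int :=
  ([(0, [1]), (1, [0, 2]), (2, [])], [0, 2])

def Spec_is_connected_subgraph (graph : List (Int × List Int)) (target_nodes : List Int) (out : Bool) : Prop := out = is_connected_subgraph_alt graph target_nodes
instance (graph : List (Int × List Int)) (target_nodes : List Int) (out : Bool) : Decidable (Spec_is_connected_subgraph graph target_nodes out) := by unfold Spec_is_connected_subgraph; infer_instance

-- ===== CLAIM (what is proved, stated in full; the proofs are below) =====
def Claim_equal_is_connected_subgraph : Prop := ∀ (graph : List (Int × List Int)) (target_nodes : List Int), Dom_is_connected_subgraph graph target_nodes → Pre_is_connected_subgraph graph target_nodes → Spec_is_connected_subgraph graph target_nodes (is_connected_subgraph graph target_nodes)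

-- ===== LEMMAS AND PROOFS =====

-- a set closed under the adjacency relation graph.get(·, [])
def ClosedSet (g : List (Int × List Int)) (T : List Int) : Prop :=
  ∀ x ∈ T, ∀ m ∈ pvAdj g x, m ∈ T

-- the first-match lookup either misses or returns a list that occurs in g at that key
lemma pvAdj_cases (g : List (Int × List Int)) (x : Int) :
    pvAdj g x = [] ∨ ∃ vs, (x, vs) ∈ g ∧ pvAdj g x = vs := by
  induction g with
  | nil => exact Or.inl rfl
  | cons p rest ih =>
    obtain ⟨k, vs⟩ := p
    rw [pvAdj_cons]
    by_cases hk : k = x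
    · subst hk
      simp only [BEq.rfl, if_pos]
      exact Or.inr ⟨vs, List.mem_cons_self, rfl⟩
    · simp only [beq_iff_eq, hk, if_neg, not_false_iff]
      rcases ih with h | ⟨ws, hw1, hw2⟩
      · exact Or.inl h
      · exact Or.inr ⟨ws, List.mem_cons_of_mem _ hw1, hw2⟩

-- with distinct keys, a pair occurring in g is what the lookup returns
lemma pvAdj_of_mem (g : List (Int × List Int)) (hnd : (g.map Prod.fst).Nodup)
    (k : Int) (vs : List Int) (h : (k, vs) ∈ g) : pvAdj g k = vs := by
  induction g with
  | nil => simp at h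
  | cons p rest ih =>
    obtain ⟨k', vs'⟩ := p
    simp only [List.map_cons, List.nodup_cons] at hnd
    rw [pvAdj_cons]
    rcases List.mem_cons.mp h with h | h
    · have h1 : k = k' := congrArg Prod.fst h
      have h2 : vs = vs' := congrArg Prod.snd h
      subst h1; subst h2
      simp
    · have hne : k' ≠ k := by
        intro he; subst he
        exact hnd.1 (List.mem_map.mpr ⟨(k', vs), h, rfl⟩)
      simp only [beq_iff_eq, hne, if_neg, not_false_iff]
      exact ih hnd.2 h

lemma bfs_mono (g : List (Int × List Int)) (s : Int) (visited queue : List Int)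
    (hq : ∀ x ∈ queue, x ∈ pvUniv g s) :
    ∀ x, x ∈ visited ∨ x ∈ queue → x ∈ bfsAux g s visited queue hq := by
  induction visited, queue, hq using bfsAux.induct g s with
  | case1 visited hq _ =>
    intro x hx
    rw [bfsAux]
    rcases hx with h | h
    · exact h
    · simp at h
  | case2 visited node rest hq hmem _ ih =>
    intro x hx
    rw [bfsAux]
    simp only [hmem, dif_pos]
    apply ih
    rcases hx with h | h
    · exact Or.inl h
    · rcases List.mem_cons.mp h with h | h
      · subst h; exact Or.inl (by simpa using hmem)
      · exact Or.inr h
  | case3 visited node rest hq hmem _ ih =>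
    intro x hx
    rw [bfsAux]
    simp only [hmem]
    apply ih
    rcases hx with h | h
    · exact Or.inl (List.mem_cons_of_mem _ h)
    · rcases List.mem_cons.mp h with h | h
      · subst h; exact Or.inl List.mem_cons_self
      · exact Or.inr (List.mem_append_left _ h)

lemma bfs_min (g : List (Int × List Int)) (s : Int) (visited queue : List Int)
    (hq : ∀ x ∈ queue, x ∈ pvUniv g s) (T : List Int) (hT : ClosedSet g T)
    (hv : ∀ x ∈ visited, x ∈ T) (hq2 : ∀ x ∈ queue, x ∈ T) :
    ∀ x ∈ bfsAux g s visited queue hq, x ∈ T := by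
  induction visited, queue, hq using bfsAux.induct g s with
  | case1 visited hq _ =>
    intro x hx
    rw [bfsAux] at hx
    exact hv x hx
  | case2 visited node rest hq hmem _ ih =>
    intro x hx
    rw [bfsAux] at hx
    simp only [hmem, dif_pos] at hx
    exact ih hv (fun y hy => hq2 y (List.mem_cons_of_mem _ hy)) x hx
  | case3 visited node rest hq hmem _ ih =>
    intro x hx
    rw [bfsAux] at hx
    simp only [hmem] at hx
    have hnode : node ∈ T := hq2 node List.mem_cons_self
    refine ih ?_ ?_ x hx
    · intro y hy
      rcases List.mem_cons.mp hy with h | h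
      · subst h; exact hnode
      · exact hv y h
    · intro y hy
      rcases List.mem_append.mp hy with h | h
      · exact hq2 y (List.mem_cons_of_mem _ h)
      · exact hT node hnode y (List.mem_of_mem_filter h)

lemma bfs_closed (g : List (Int × List Int)) (s : Int) (visited queue : List Int)
    (hq : ∀ x ∈ queue, x ∈ pvUniv g s)
    (hinv : ∀ v ∈ visited, ∀ m ∈ pvAdj g v, m ∈ visited ∨ m ∈ queue) :
    ClosedSet g (bfsAux g s visited queue hq) := by
  induction visited, queue, hq using bfsAux.induct g s with
  | case1 visited hq _ =>
    intro x hx m hm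
    rw [bfsAux] at *
    rcases hinv x hx m hm with h | h
    · exact h
    · simp at h
  | case2 visited node rest hq hmem _ ih =>
    intro x hx m hm
    rw [bfsAux] at hx ⊢
    simp only [hmem, dif_pos] at hx ⊢
    refine ih ?_ x hx m hm
    intro v hv m' hm'
    rcases hinv v hv m' hm' with h | h
    · exact Or.inl h
    · rcases List.mem_cons.mp h with h | h
      · subst h; exact Or.inl (by simpa using hmem)
      · exact Or.inr h
  | case3 visited node rest hq hmem _ ih =>
    intro x hx m hm
    rw [bfsAux] at hx ⊢
    simp only [hmem] at hx ⊢
    refine ih ?_ x hx m hm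
    intro v hv m' hm'
    rcases List.mem_cons.mp hv with h | h
    · subst h
      by_cases hc : (v :: visited).contains m'
      · exact Or.inl (by simpa using hc)
      · refine Or.inr (List.mem_append_right _ ?_)
        exact List.mem_filter.mpr ⟨hm', by simpa using hc⟩
    · rcases hinv v h m' hm' with h' | h'
      · exact Or.inl (List.mem_cons_of_mem _ h')
      · rcases List.mem_cons.mp h' with h'' | h''
        · subst h''; exact Or.inl List.mem_cons_self
        · exact Or.inr (List.mem_append_left _ h'')

-- once the changed flag is set it stays set
lemma addAll_flag (L : List Int) (st : List Int × Bool) (h : st.2 = true) :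
    (addAll st L).2 = true := by
  induction L generalizing st with
  | nil => exact h
  | cons m rest ih =>
    simp only [addAll, List.foldl_cons]
    by_cases hm : st.1.contains m
    · simp only [hm, if_pos]
      exact ih st h
    · simp only [hm, if_neg, Bool.false_eq_true, not_false_iff]
      exact ih (m :: st.1, true) rfl

lemma passF_flag (g : List (Int × List Int)) (st : List Int × Bool) (h : st.2 = true) :
    (passF g st).2 = true := by
  induction g generalizing st with
  | nil => exact h
  | cons p rest ih =>
    simp only [passF, List.foldl_cons]
    by_cases hp : st.1.contains p.1
    · simp only [hp, if_pos]
      exact ih (addAll st p.2) (addAll_flag p.2 st h)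
    · simp only [hp]
      exact ih st h

-- a pass that reports no change really changed nothing, and every scanned neighbor was present
lemma addAll_stable (L : List Int) (st : List Int × Bool) (h : (addAll st L).2 = false) :
    (addAll st L).1 = st.1 ∧ st.2 = false ∧ ∀ m ∈ L, m ∈ st.1 := by
  induction L generalizing st with
  | nil => exact ⟨rfl, h, by simp⟩
  | cons m rest ih =>
    simp only [addAll, List.foldl_cons] at h ⊢
    by_cases hm : st.1.contains m
    · simp only [hm, if_pos] at h ⊢
      obtain ⟨h1, h2, h3⟩ := ih st h
      refine ⟨h1, h2, ?_⟩
      intro y hy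
      rcases List.mem_cons.mp hy with h' | h'
      · subst h'; simpa using hm
      · exact h3 y h'
    · simp only [hm, if_neg, Bool.false_eq_true, not_false_iff] at h ⊢
      exact Bool.noConfusion ((addAll_flag rest (m :: st.1, true) rfl).symm.trans h)

lemma passF_stable (g : List (Int × List Int)) (v : List Int)
    (h : (passF g (v, false)).2 = false) :
    (passF g (v, false)).1 = v ∧
    ∀ p ∈ g, p.1 ∈ v → ∀ m ∈ p.2, m ∈ v := by
  induction g generalizing v with
  | nil => exact ⟨rfl, by simp⟩
  | cons p rest ih =>
    simp only [passF, List.foldl_cons] at h ⊢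
    by_cases hp : (v : List Int).contains p.1
    · simp only [hp, if_pos] at h ⊢
      have hflag : (addAll (v, false) p.2).2 = false := by
        cases hb : (addAll (v, false) p.2).2 with
        | false => rfl
        | true =>
          have hr : addAll (v, false) p.2 = ((addAll (v, false) p.2).1, true) := by
            rw [← hb]
          rw [hr] at h
          exact Bool.noConfusion
            ((passF_flag rest ((addAll (v, false) p.2).1, true) rfl).symm.trans h)
      obtain ⟨ha1, _, ha3⟩ := addAll_stable p.2 (v, false) hflag
      have hr : addAll (v, false) p.2 = (v, false) := Prod.ext ha1 hflag
      rw [hr] at h ⊢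
      obtain ⟨h1, h2⟩ := ih v h
      refine ⟨h1, ?_⟩
      intro q hq hq1 m hm
      rcases List.mem_cons.mp hq with h' | h'
      · subst h'; exact ha3 m hm
      · exact h2 q h' hq1 m hm
    · simp only [hp] at h ⊢
      obtain ⟨h1, h2⟩ := ih v h
      refine ⟨h1, ?_⟩
      intro q hq hq1 m hm
      rcases List.mem_cons.mp hq with h' | h'
      · subst h'
        exact absurd (by simpa using hq1) (by simpa using hp)
      · exact h2 q h' hq1 m hm

lemma addAll_T (L : List Int) (st : List Int × Bool) (T : List Int)
    (hst : ∀ x ∈ st.1, x ∈ T) (hL : ∀ m ∈ L, m ∈ T) :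
    ∀ x ∈ (addAll st L).1, x ∈ T := by
  induction L generalizing st with
  | nil => exact hst
  | cons m rest ih =>
    simp only [addAll, List.foldl_cons]
    by_cases hm : st.1.contains m
    · simp only [hm, if_pos]
      exact ih st hst (fun y hy => hL y (List.mem_cons_of_mem _ hy))
    · simp only [hm, if_neg, Bool.false_eq_true, not_false_iff]
      refine ih (m :: st.1, true) ?_ (fun y hy => hL y (List.mem_cons_of_mem _ hy))
      intro y hy
      rcases List.mem_cons.mp hy with h | h
      · subst h; exact hL y List.mem_cons_self
      · exact hst y h

lemma passF_T (g g0 : List (Int × List Int)) (st : List Int × Bool) (T : List Int)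
    (hsub : ∀ p ∈ g, p ∈ g0)
    (hnd : (g0.map Prod.fst).Nodup) (hT : ClosedSet g0 T)
    (hst : ∀ x ∈ st.1, x ∈ T) :
    ∀ x ∈ (passF g st).1, x ∈ T := by
  induction g generalizing st with
  | nil => exact hst
  | cons p rest ih =>
    simp only [passF, List.foldl_cons]
    by_cases hp : st.1.contains p.1
    · simp only [hp, if_pos]
      refine ih (addAll st p.2) (fun q hq => hsub q (List.mem_cons_of_mem _ hq)) ?_
      refine addAll_T p.2 st T hst ?_
      intro m hm
      have hk : p.1 ∈ T := hst p.1 (by simpa using hp)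
      have hadj : pvAdj g0 p.1 = p.2 := pvAdj_of_mem g0 hnd p.1 p.2 (by
        have := hsub p List.mem_cons_self
        simpa using this)
      exact hT p.1 hk m (hadj ▸ hm)
    · simp only [hp]
      exact ih st (fun q hq => hsub q (List.mem_cons_of_mem _ hq)) hst

lemma sat_mono (g : List (Int × List Int)) (visited : List Int) :
    ∀ x ∈ visited, x ∈ satLoop g visited := by
  induction visited using satLoop.induct g with
  | case1 v st hch ih =>
    intro x hx
    rw [satLoop]
    rw [dif_pos hch]
    exact ih x ((passF_spec g (v, false)).1 x hx)
  | case2 v st hch =>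
    intro x hx
    rw [satLoop]
    rw [dif_neg hch]
    exact (passF_spec g (v, false)).1 x hx

lemma sat_min (g : List (Int × List Int)) (visited : List Int) (T : List Int)
    (hnd : (g.map Prod.fst).Nodup) (hT : ClosedSet g T) (hv : ∀ x ∈ visited, x ∈ T) :
    ∀ x ∈ satLoop g visited, x ∈ T := by
  induction visited using satLoop.induct g with
  | case1 v st hch ih =>
    intro x hx
    rw [satLoop] at hx
    rw [dif_pos hch] at hx
    exact ih (passF_T g g (v, false) T (fun q hq => hq) hnd hT hv) x hx
  | case2 v st hch =>
    intro x hx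
    rw [satLoop] at hx
    rw [dif_neg hch] at hx
    exact passF_T g g (v, false) T (fun q hq => hq) hnd hT hv x hx

lemma sat_closed (g : List (Int × List Int)) (visited : List Int) :
    ClosedSet g (satLoop g visited) := by
  induction visited using satLoop.induct g with
  | case1 v st hch ih =>
    intro x hx m hm
    rw [satLoop] at hx ⊢
    rw [dif_pos hch] at hx ⊢
    exact ih x hx m hm
  | case2 v st hch =>
    intro x hx m hm
    rw [satLoop] at hx ⊢
    rw [dif_neg hch] at hx ⊢
    have hfalse : (passF g (v, false)).2 = false := by
      cases h : (passF g (v, false)).2 with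
      | false => rfl
      | true => exact absurd h hch
    obtain ⟨h1, h2⟩ := passF_stable g v hfalse
    rw [h1] at hx ⊢
    rcases pvAdj_cases g x with h | ⟨vs, hvs1, hvs2⟩
    · rw [h] at hm; simp at hm
    · rw [hvs2] at hm
      exact h2 (x, vs) hvs1 hx m hm

-- ===== VERDICT (by name: the statement is the Claim_ definition above) =====
-- pointwise-equal membership gives the same 'all n in targets: n in visited' answer
lemma all_contains_congr (A B ts : List Int) (h : ∀ x, x ∈ A ↔ x ∈ B) :
    ts.all (fun n => A.contains n) = ts.all (fun n => B.contains n) := by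
  have hf : (fun n => A.contains n) = (fun n => B.contains n) := by
    funext n
    rw [Bool.eq_iff_iff, List.contains_iff_mem, List.contains_iff_mem]
    exact h n
  rw [hf]

theorem is_connected_subgraph_spec : Claim_equal_is_connected_subgraph := by
  intro g ts _ hpre
  unfold Spec_is_connected_subgraph is_connected_subgraph is_connected_subgraph_alt
  by_cases hlen : ts.length ≤ 1
  · simp [hlen]
  · simp only [hlen, if_neg, not_false_iff]
    apply all_contains_congr
    intro x
    constructor
    · intro hx
      refine bfs_min g ts.headI [] [ts.headI] _ _ (sat_closed g [ts.headI]) (by simp) ?_ x hx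
      intro y hy
      simp only [List.mem_singleton] at hy
      subst hy
      exact sat_mono g [ts.headI] ts.headI List.mem_cons_self
    · intro hx
      refine sat_min g [ts.headI] _ hpre ?_ ?_ x hx
      · exact bfs_closed g ts.headI [] [ts.headI] _ (by simp)
      · intro y hy
        simp only [List.mem_singleton] at hy
        subst hy
        exact bfs_mono g ts.headI [] [ts.headI] _ ts.headI (Or.inr List.mem_cons_self)
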